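-- pv_equiv track=rewrite | github.com/Tay-Son/GH_CT | algorithm/PRG-Completed/PRGt 36011.py | solution
-- ===== SOURCE A (Python) =====
-- def solution(lst_A, lst_B):
--     lst_B.sort()
--     ptr_b = 0
--     cnt_ = 0
--
--     for a_ in sorted(lst_A):
--         while ptr_b < len(lst_B) and lst_B[ptr_b] <= a_:
--             ptr_b += 1
--         if ptr_b == len(lst_B):
--             break
--         elif lst_B[ptr_b] > a_:
--             cnt_ += 1
--             ptr_b += 1
--
--     return cnt_
-- ===== SOURCE B (Python) =====
-- def solution(lst_A, lst_B):
--     lst_B.sort()  # preserve A's observable in-place sort of lst_B; the formula below ignores order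
--     # Hall-type deficiency formula: the greedy maximum number of B-elements that can
--     # strictly beat distinct A-elements equals len(A) minus the worst deficit
--     # max(0, max over thresholds v in A of  #{a in A : a >= v} - #{b in B : b > v}).
--     deficits = [sum(1 for x in lst_A if x >= v) - sum(1 for y in lst_B if y > v)
--                 for v in lst_A]
--     if not deficits:
--         return 0
--     return len(lst_A) - max(0, max(deficits))
-- ===== Notes on version B (the rewrite author's own statement) =====
-- stated objective: alternative
-- what changed: B replaces A's sort-and-greedy pointer matching by a closed counting characterization: the answer is len(lst_A) minus the worst Hall-type deficit max(0, max over v in lst_A of #{a in A : a >= v} - #{b in B : b > v}); no sorting of A, no matching loop (lst_B.sort() is kept only for A's observable mutation).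
import Mathlib
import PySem

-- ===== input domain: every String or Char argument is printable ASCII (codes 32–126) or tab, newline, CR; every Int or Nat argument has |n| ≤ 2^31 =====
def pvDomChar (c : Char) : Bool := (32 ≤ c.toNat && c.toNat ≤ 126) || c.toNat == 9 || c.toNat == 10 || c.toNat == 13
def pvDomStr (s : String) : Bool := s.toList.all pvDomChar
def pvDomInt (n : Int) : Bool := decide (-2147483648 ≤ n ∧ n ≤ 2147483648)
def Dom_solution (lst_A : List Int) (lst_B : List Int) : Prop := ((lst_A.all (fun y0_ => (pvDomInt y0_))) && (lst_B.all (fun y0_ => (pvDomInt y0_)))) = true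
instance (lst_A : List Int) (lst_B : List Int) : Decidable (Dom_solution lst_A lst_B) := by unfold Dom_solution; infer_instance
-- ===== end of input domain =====

-- B replaces A's sort-and-greedy pointer matching by a Hall-type deficiency formula:
-- len(A) - max(0, max over v in A of #{a in A : a >= v} - #{b in B : b > v}).
-- B keeps A's in-place sort of lst_B (identical observable mutation); the claim is about the return value.

-- ===== PORT A =====
-- the inner 'while ptr_b < len(lst_B) and lst_B[ptr_b] <= a_: ptr_b += 1'
def skipA (sB : List Int) (a : Int) (j : Nat) : Nat :=
  if h : j < sB.length ∧ sB.getD j 0 ≤ a then skipA sB a (j + 1) else j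
termination_by sB.length - j
decreasing_by omega

-- one iteration of A's for-loop; state = (ptr_b, cnt_, broke)
def stepA (sB : List Int) (s : Nat × Int × Bool) (a : Int) : Nat × Int × Bool :=
  if s.2.2 then s
  else
    let ptr := skipA sB a s.1
    if ptr = sB.length then (ptr, s.2.1, true)
    else if sB.getD ptr 0 > a then (ptr + 1, s.2.1 + 1, false)
    else (ptr, s.2.1, false)

def solution (lst_A : List Int) (lst_B : List Int) : Int :=
  let sB := PySem.List.sorted lst_B (fun x => x)
  ((PySem.List.sorted lst_A (fun x => x)).foldl (stepA sB) (0, 0, false)).2.1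

-- ===== PORT B =====
-- deficits = [sum(1 for x in lst_A if x >= v) - sum(1 for y in lst_B if y > v) for v in lst_A]
def solution_alt (lst_A : List Int) (lst_B : List Int) : Int :=
  let deficits := lst_A.map (fun v =>
    ((lst_A.filter (fun x => decide (v ≤ x))).length : Int) -
    ((lst_B.filter (fun y => decide (v < y))).length : Int))
  match deficits with
  | [] => 0
  | d :: ds => (lst_A.length : Int) - max 0 (ds.foldl max d)

-- ===== PRECONDITION & SPEC =====
def Spec_solution (lst_A : List Int) (lst_B : List Int) (out : Int) : Prop := out = solution_alt lst_A lst_B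
instance (lst_A : List Int) (lst_B : List Int) (out : Int) : Decidable (Spec_solution lst_A lst_B out) := by unfold Spec_solution; infer_instance

-- ===== CLAIM (what is proved, stated in full; the proofs are below) =====
def Claim_equal_solution : Prop := ∀ (lst_A : List Int) (lst_B : List Int), Dom_solution lst_A lst_B → Spec_solution lst_A lst_B (solution lst_A lst_B)

-- ===== LEMMAS AND PROOFS =====

-- counts
def cntA (l : List Int) (v : Int) : Int := ((l.filter (fun x => decide (v ≤ x))).length : Int)
def cntB (l : List Int) (v : Int) : Int := ((l.filter (fun y => decide (v < y))).length : Int)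

theorem cntA_cons (x : Int) (l : List Int) (v : Int) :
    cntA (x :: l) v = (if v ≤ x then 1 else 0) + cntA l v := by
  simp only [cntA, List.filter_cons]
  split_ifs with h <;> simp_all <;> omega

theorem cntB_cons (y : Int) (l : List Int) (v : Int) :
    cntB (y :: l) v = (if v < y then 1 else 0) + cntB l v := by
  simp only [cntB, List.filter_cons]
  split_ifs with h <;> simp_all <;> omega

theorem cntB_nonneg (l : List Int) (v : Int) : 0 ≤ cntB l v := Int.natCast_nonneg _

theorem cntA_le_length (l : List Int) (v : Int) : cntA l v ≤ (l.length : Int) := by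
  have := List.length_filter_le (fun x => decide (v ≤ x)) l
  simp [cntA]; omega

theorem cntB_le_length (l : List Int) (v : Int) : cntB l v ≤ (l.length : Int) := by
  have := List.length_filter_le (fun y => decide (v < y)) l
  simp [cntB]; omega

theorem cntA_all (l : List Int) (v : Int) (h : ∀ x ∈ l, v ≤ x) : cntA l v = (l.length : Int) := by
  have : l.filter (fun x => decide (v ≤ x)) = l := List.filter_eq_self.mpr (by simpa using h)
  simp [cntA, this]

theorem cntB_all (l : List Int) (v : Int) (h : ∀ y ∈ l, v < y) : cntB l v = (l.length : Int) := by
  have : l.filter (fun y => decide (v < y)) = l := List.filter_eq_self.mpr (by simpa using h)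
  simp [cntB, this]

theorem cntB_anti (l : List Int) (v w : Int) (hvw : v ≤ w) : cntB l w ≤ cntB l v := by
  induction l with
  | nil => simp [cntB]
  | cons y l ih =>
    rw [cntB_cons, cntB_cons]
    split_ifs with h1 h2 <;> omega

theorem cntA_perm (l₁ l₂ : List Int) (h : l₁.Perm l₂) (v : Int) : cntA l₁ v = cntA l₂ v := by
  simp [cntA, (h.filter (fun x => decide (v ≤ x))).length_eq]

theorem cntB_perm (l₁ l₂ : List Int) (h : l₁.Perm l₂) (v : Int) : cntB l₁ v = cntB l₂ v := by
  simp [cntB, (h.filter (fun y => decide (v < y))).length_eq]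

-- foldl max machinery
theorem le_foldl_max (l : List Int) (i : Int) : i ≤ l.foldl max i := by
  induction l generalizing i with
  | nil => simp
  | cons x l ih => exact le_trans (le_max_left i x) (ih (max i x))

theorem mem_le_foldl_max (l : List Int) (i x : Int) (hx : x ∈ l) : x ≤ l.foldl max i := by
  induction l generalizing i with
  | nil => simp at hx
  | cons y l ih =>
    rcases List.mem_cons.mp hx with h | h
    · subst h; exact le_trans (le_max_right i x) (le_foldl_max l (max i x))
    · exact ih (max i y) h

theorem foldl_max_le (l : List Int) (i c : Int) (hi : i ≤ c) (h : ∀ x ∈ l, x ≤ c) :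
    l.foldl max i ≤ c := by
  induction l generalizing i with
  | nil => simpa using hi
  | cons x l ih =>
    exact ih (max i x) (max_le hi (h x (by simp))) (fun y hy => h y (by simp [hy]))

-- Kmax f l = max(0, max over v in l of f v)
def Kmax (f : Int → Int) (l : List Int) : Int := (l.map f).foldl max 0

theorem Kmax_nonneg (f : Int → Int) (l : List Int) : 0 ≤ Kmax f l := le_foldl_max _ 0

theorem le_Kmax (f : Int → Int) (l : List Int) (v : Int) (hv : v ∈ l) : f v ≤ Kmax f l :=
  mem_le_foldl_max _ 0 (f v) (List.mem_map_of_mem hv)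

theorem Kmax_le (f : Int → Int) (l : List Int) (c : Int) (hc : 0 ≤ c)
    (h : ∀ v ∈ l, f v ≤ c) : Kmax f l ≤ c := by
  refine foldl_max_le _ 0 c hc ?_
  intro x hx
  obtain ⟨v, hv, rfl⟩ := List.mem_map.mp hx
  exact h v hv

theorem Kmax_congr (f g : Int → Int) (l : List Int) (h : ∀ v ∈ l, f v = g v) :
    Kmax f l = Kmax g l := by
  unfold Kmax
  rw [List.map_congr_left h]

theorem Kmax_eq_of_mem_iff (f : Int → Int) (l₁ l₂ : List Int) (h : ∀ v, v ∈ l₁ ↔ v ∈ l₂) :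
    Kmax f l₁ = Kmax f l₂ := by
  refine le_antisymm ?_ ?_
  · exact Kmax_le f l₁ _ (Kmax_nonneg f l₂) (fun v hv => le_Kmax f l₂ v ((h v).mp hv))
  · exact Kmax_le f l₂ _ (Kmax_nonneg f l₁) (fun v hv => le_Kmax f l₁ v ((h v).mpr hv))

theorem foldl_max_shift (ds : List Int) (i x : Int) :
    ds.foldl max (max i x) = max i (ds.foldl max x) := by
  induction ds generalizing x with
  | nil => simp
  | cons y ds ih =>
    simp only [List.foldl]
    rw [max_assoc, ih (max x y)]

-- the deficiency function
def Wf (as bs : List Int) : Int := Kmax (fun v => cntA as v - cntB bs v) as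

-- A's greedy, structurally: first arg = remaining B suffix, recursion over the A list
def gA : List Int → List Int → Int
  | _, [] => 0
  | bs, a :: as =>
    match bs.dropWhile (fun b => decide (b ≤ a)) with
    | [] => 0
    | _ :: bs' => 1 + gA bs' as
termination_by bs as => as.length

-- B-side greedy (ascending), used as the bridge between A's fold and the formula
def gB : List Int → List Int → Int
  | _, [] => 0
  | [], _ :: _ => 0
  | a :: as, b :: bs => if a < b then 1 + gB as bs else gB (a :: as) bs
termination_by as bs => as.length + bs.length

theorem gB_nil (bs : List Int) : gB [] bs = 0 := by
  cases bs <;> simp [gB]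

theorem dropWhile_head_false (p : Int → Bool) (l : List Int) (x : Int) (t : List Int)
    (h : l.dropWhile p = x :: t) : p x = false := by
  have hne : l.dropWhile p ≠ [] := by simp [h]
  have hh := List.head_dropWhile_not p hne
  simpa [h] using hh

theorem skipA_le (sB : List Int) (a : Int) (j : Nat) (hj : j ≤ sB.length) :
    skipA sB a j ≤ sB.length := by
  unfold skipA
  split
  · rename_i h
    exact skipA_le sB a (j + 1) (by omega)
  · exact hj
termination_by sB.length - j
decreasing_by omega

theorem skipA_drop (sB : List Int) (a : Int) (j : Nat) :
    sB.drop (skipA sB a j) = (sB.drop j).dropWhile (fun b => decide (b ≤ a)) := by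
  unfold skipA
  split
  · rename_i h
    obtain ⟨hj, hle⟩ := h
    have hd : sB.drop j = sB[j] :: sB.drop (j + 1) := List.drop_eq_getElem_cons hj
    have hg : sB.getD j 0 = sB[j] := List.getD_eq_getElem sB 0 hj
    rw [skipA_drop sB a (j + 1), hd]
    rw [List.dropWhile_cons]
    simp [hg ▸ hle]
  · rename_i h
    by_cases hjl : j < sB.length
    · have hle : ¬ sB.getD j 0 ≤ a := by tauto
      have hd : sB.drop j = sB[j] :: sB.drop (j + 1) := List.drop_eq_getElem_cons hjl
      have hg : sB.getD j 0 = sB[j] := List.getD_eq_getElem sB 0 hjl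
      rw [hd, List.dropWhile_cons]
      simp [hg ▸ hle]
    · have : sB.drop j = [] := List.drop_eq_nil_of_le (by omega)
      simp [this]
termination_by sB.length - j
decreasing_by omega

theorem foldA_done (sB : List Int) (as : List Int) (j : Nat) (c : Int) :
    as.foldl (stepA sB) (j, c, true) = (j, c, true) := by
  induction as with
  | nil => rfl
  | cons a as ih => simp [List.foldl, stepA, ih]

theorem foldA (sB : List Int) (as : List Int) (j : Nat) (c : Int) (hj : j ≤ sB.length) :
    ((as.foldl (stepA sB) (j, c, false)).2.1 : Int) = c + gA (sB.drop j) as := by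
  induction as generalizing j c with
  | nil => simp [gA]
  | cons a as ih =>
    have hdw := skipA_drop sB a j
    simp only [List.foldl]
    by_cases hlen : skipA sB a j = sB.length
    · have hnil : sB.drop (skipA sB a j) = [] := List.drop_eq_nil_of_le (by omega)
      rw [show stepA sB (j, c, false) a = (skipA sB a j, c, true) by
        simp [stepA, hlen]]
      rw [foldA_done]
      rw [gA, hdw.symm.trans hnil]
      simp
    · have hlt : skipA sB a j < sB.length := lt_of_le_of_ne (skipA_le sB a j hj) hlen
      have hd : sB.drop (skipA sB a j) = sB[skipA sB a j] :: sB.drop (skipA sB a j + 1) :=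
        List.drop_eq_getElem_cons hlt
      have hcons : (sB.drop j).dropWhile (fun b => decide (b ≤ a))
          = sB[skipA sB a j] :: sB.drop (skipA sB a j + 1) := hdw.symm.trans hd
      have hgt : a < sB[skipA sB a j] := by
        have := dropWhile_head_false (fun b => decide (b ≤ a)) (sB.drop j) _ _ hcons
        simp at this
        omega
      rw [show stepA sB (j, c, false) a = (skipA sB a j + 1, c + 1, false) by
        simp [stepA, hlen, List.getElem?_eq_getElem hlt, hgt]]
      rw [ih (skipA sB a j + 1) (c + 1) (by omega)]
      rw [gA, hcons]
      ring

theorem gA_eq_gB (bs as : List Int) : gA bs as = gB as bs := by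
  induction bs generalizing as with
  | nil =>
    cases as with
    | nil => simp [gA, gB]
    | cons a as => simp [gA, gB]
  | cons b bs ih =>
    cases as with
    | nil => simp [gA, gB]
    | cons a as =>
      by_cases hab : a < b
      · have : ¬ (b ≤ a) := by omega
        rw [gA]
        simp only [List.dropWhile_cons, this, decide_false]
        simp [gB, hab, ih]
      · have hba : b ≤ a := by omega
        rw [gA]
        simp only [List.dropWhile_cons, hba, decide_true]
        rw [gB, if_neg hab, ← ih (a :: as), gA]
        simp

-- Wf on the empty B list for a sorted A list is |as|
theorem Wf_nil (as : List Int) (ha : as.Pairwise (· ≤ ·)) : Wf as [] = (as.length : Int) := by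
  unfold Wf
  cases as with
  | nil => simp [Kmax]
  | cons a as' =>
    have hmin : ∀ x ∈ a :: as', a ≤ x := by
      intro x hx
      rcases List.mem_cons.mp hx with h | h
      · omega
      · exact (List.pairwise_cons.mp ha).1 x h
    refine le_antisymm ?_ ?_
    · refine Kmax_le _ _ _ (Int.natCast_nonneg _) ?_
      intro v hv
      have h1 := cntA_le_length (a :: as') v
      have h2 := cntB_nonneg ([] : List Int) v
      omega
    · have hK : cntA (a :: as') a - cntB [] a ≤
          Kmax (fun v => cntA (a :: as') v - cntB [] v) (a :: as') :=
        le_Kmax _ _ a (by simp)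
      have hall := cntA_all (a :: as') a hmin
      have hB : cntB ([] : List Int) a = 0 := by simp [cntB]
      omega

-- in the deficit at v ∈ as (head a), counting over b::bs equals counting over bs when b ≤ a
theorem Wf_dropB (a b : Int) (as' bs' : List Int) (ha : (a :: as').Pairwise (· ≤ ·)) (hba : b ≤ a) :
    Wf (a :: as') (b :: bs') = Wf (a :: as') bs' := by
  unfold Wf
  refine Kmax_congr _ _ _ ?_
  intro v hv
  have hav : a ≤ v := by
    rcases List.mem_cons.mp hv with h | h
    · omega
    · exact (List.pairwise_cons.mp ha).1 v h
  rw [cntB_cons]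
  have : ¬ v < b := by omega
  simp [this]

-- the key step: when the minima satisfy a < b, matching them leaves the deficiency unchanged
theorem Wf_match (a b : Int) (as' bs' : List Int)
    (ha : (a :: as').Pairwise (· ≤ ·)) (hb : (b :: bs').Pairwise (· ≤ ·)) (hab : a < b) :
    Wf (a :: as') (b :: bs') = Wf as' bs' := by
  have haMin : ∀ x ∈ as', a ≤ x := (List.pairwise_cons.mp ha).1
  have hbMin : ∀ y ∈ bs', b ≤ y := (List.pairwise_cons.mp hb).1
  have ha' : as'.Pairwise (· ≤ ·) := (List.pairwise_cons.mp ha).2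
  unfold Wf
  refine le_antisymm ?_ ?_
  · -- every deficit on the left is bounded by the right-hand maximum
    refine Kmax_le _ _ _ (Kmax_nonneg _ _) ?_
    intro v hv
    rcases List.mem_cons.mp hv with hva | hv'
    · -- v = a : compare with the deficit at the minimum of as' (or with 0)
      subst hva
      cases as' with
      | nil =>
        have hK := Kmax_nonneg (fun w => cntA ([] : List Int) w - cntB bs' w) ([] : List Int)
        have h1 := cntA_le_length [v] v
        have h2 := cntB_nonneg bs' v
        rw [cntB_cons]
        simp only [if_pos hab]
        simp only [List.length_cons, List.length_nil] at h1
        omega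
      | cons a' as'' =>
        have ha'' : v ≤ a' := haMin a' (by simp)
        have hKey : cntA (a' :: as'') a' - cntB bs' a' ≤
            Kmax (fun w => cntA (a' :: as'') w - cntB bs' w) (a' :: as'') :=
          le_Kmax _ _ a' (by simp)
        have hAll : cntA (a' :: as'') a' = ((a' :: as'').length : Int) :=
          cntA_all _ _ (by
            intro x hx
            rcases List.mem_cons.mp hx with h | h
            · omega
            · exact le_trans (le_refl a') ((List.pairwise_cons.mp ha').1 x h))
        have hAv : cntA (v :: a' :: as'') v ≤ ((v :: a' :: as'').length : Int) :=
          cntA_le_length _ _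
        have hmono : cntB bs' a' ≤ cntB bs' v := cntB_anti bs' v a' ha''
        rw [cntB_cons]
        simp only [if_pos hab]
        simp only [List.length_cons] at *
        omega
    · -- v ∈ as'
      have hav : a ≤ v := haMin v hv'
      have hKey : cntA as' v - cntB bs' v ≤
          Kmax (fun w => cntA as' w - cntB bs' w) as' := le_Kmax _ _ v hv'
      by_cases hvb : v < b
      · have hA' : cntA as' v ≤ (as'.length : Int) := cntA_le_length _ _
        rw [cntA_cons, cntB_cons]
        simp only [if_pos hvb]
        split_ifs with hva
        · omega
        · omega
      · have h1 : ¬ v ≤ a := by omega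
        rw [cntA_cons, cntB_cons]
        simp only [if_neg h1, if_neg hvb]
        omega
  · -- every deficit on the right is bounded by the left-hand maximum
    refine Kmax_le _ _ _ (Kmax_nonneg _ _) ?_
    intro v hv
    have hav : a ≤ v := haMin v hv
    by_cases hvb : v < b
    · -- cntB bs' v = |bs'|; bound by the left-hand deficit at a
      have hBall : cntB bs' v = (bs'.length : Int) :=
        cntB_all _ _ (fun y hy => lt_of_lt_of_le hvb (hbMin y hy))
      have hKey : cntA (a :: as') a - cntB (b :: bs') a ≤
          Kmax (fun w => cntA (a :: as') w - cntB (b :: bs') w) (a :: as') :=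
        le_Kmax _ _ a (by simp)
      have hAa : cntA (a :: as') a = ((a :: as').length : Int) :=
        cntA_all _ _ (by
          intro x hx
          rcases List.mem_cons.mp hx with h | h
          · omega
          · exact haMin x h)
      have hBa : cntB bs' a ≤ (bs'.length : Int) := cntB_le_length _ _
      have hA' : cntA as' v ≤ (as'.length : Int) := cntA_le_length _ _
      rw [cntB_cons] at hKey
      simp only [if_pos hab, hAa] at hKey
      simp only [List.length_cons] at *
      omega
    · -- v ≥ b : the two deficits at v coincide; bound by the left-hand one at v
      have hKey : cntA (a :: as') v - cntB (b :: bs') v ≤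
          Kmax (fun w => cntA (a :: as') w - cntB (b :: bs') w) (a :: as') :=
        le_Kmax _ _ v (by simp [hv])
      rw [cntA_cons, cntB_cons] at hKey
      have h1 : ¬ v ≤ a := by omega
      simp only [if_neg h1, if_neg hvb] at hKey
      omega

-- the greedy equals the deficiency formula on sorted lists
theorem gB_eq_Wf (bs as : List Int) (ha : as.Pairwise (· ≤ ·)) (hb : bs.Pairwise (· ≤ ·)) :
    gB as bs = (as.length : Int) - Wf as bs := by
  induction bs generalizing as with
  | nil =>
    rw [Wf_nil as ha]
    cases as <;> simp [gB]
  | cons b bs' ih =>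
    have hb' : bs'.Pairwise (· ≤ ·) := (List.pairwise_cons.mp hb).2
    cases as with
    | nil =>
      rw [gB_nil]
      simp [Wf, Kmax]
    | cons a as' =>
      by_cases hab : a < b
      · rw [gB, if_pos hab, Wf_match a b as' bs' ha hb hab,
          ih as' (List.pairwise_cons.mp ha).2 hb']
        simp only [List.length_cons]
        push_cast
        ring
      · rw [gB, if_neg hab, Wf_dropB a b as' bs' ha (by omega), ih (a :: as') ha hb']

-- transfer Wf from the sorted lists back to the original lists
theorem Wf_perm (as bs as' bs' : List Int) (hA : as.Perm as') (hB : bs.Perm bs') :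
    Wf as bs = Wf as' bs' := by
  unfold Wf
  rw [Kmax_congr (fun v => cntA as v - cntB bs v) (fun v => cntA as' v - cntB bs' v) as
      (fun v _ => by
        show cntA as v - cntB bs v = cntA as' v - cntB bs' v
        rw [cntA_perm as as' hA v, cntB_perm bs bs' hB v])]
  exact Kmax_eq_of_mem_iff _ _ _ (fun v => hA.mem_iff)

-- B's port computes |lst_A| - Wf lst_A lst_B
theorem solution_alt_eq (lst_A lst_B : List Int) :
    solution_alt lst_A lst_B = (lst_A.length : Int) - Wf lst_A lst_B := by
  unfold solution_alt Wf Kmax cntA cntB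
  cases h : lst_A.map (fun v =>
      ((lst_A.filter (fun x => decide (v ≤ x))).length : Int) -
      ((lst_B.filter (fun y => decide (v < y))).length : Int)) with
  | nil =>
    have : lst_A = [] := by
      cases lst_A with
      | nil => rfl
      | cons a t => simp at h
    subst this
    simp
  | cons d ds =>
    have hsh : (d :: ds).foldl max 0 = max 0 (ds.foldl max d) := by
      show ds.foldl max (max 0 d) = _
      exact foldl_max_shift ds 0 d
    rw [hsh]

theorem solution_eq (lst_A lst_B : List Int) : solution lst_A lst_B = solution_alt lst_A lst_B := by
  unfold solution
  rw [foldA _ _ _ _ (by omega)]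
  simp only [List.drop_zero, zero_add]
  rw [gA_eq_gB]
  have hA := PySem.List.sorted_pairwise (xs := lst_A) (key := fun x => x)
  have hB := PySem.List.sorted_pairwise (xs := lst_B) (key := fun x => x)
  rw [gB_eq_Wf _ _ hA hB]
  rw [Wf_perm _ _ lst_A lst_B (PySem.List.sorted_perm _ _ _) (PySem.List.sorted_perm _ _ _)]
  rw [(PySem.List.sorted_perm lst_A (fun x => x) false).length_eq]
  rw [solution_alt_eq]

-- ===== VERDICT (by name: the statement is the Claim_ definition above) =====
theorem solution_spec : Claim_equal_solution := by
  intro lst_A lst_B _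
  unfold Spec_solution
  exact solution_eq lst_A lst_B
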